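-- pv_equiv track=rewrite | github.com/dadebeats/lol-nlp-prediction | asr/run_batch_gpt.py | consolidate_corrections
-- ===== SOURCE A (Python) =====
-- from collections import defaultdict, Counter
-- from typing import List, Tuple, Dict, List as TList
--
-- def consolidate_corrections(corrections: List[Tuple[str, str]]) -> List[Tuple[str, str]]:
--     """
--     Resolve multiple candidates for the same source string via majority vote.
--     Ties are broken by last occurrence; longer source strings are applied first.
--     """
--     by_from = defaultdict(list)
--     for frm, to in corrections:
--         if frm and to and frm != to:
--             by_from[frm].append(to)
--
--     final = []
--     for frm, tos in by_from.items():
--         counts = Counter(tos)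
--         max_freq = max(counts.values())
--         candidates = [t for t, c in counts.items() if c == max_freq]
--         for t in reversed(tos):
--             if t in candidates:
--                 final.append((frm, t))
--                 break
--
--     final.sort(key=lambda p: len(p[0]), reverse=True)
--     return final
-- ===== SOURCE B (Python) =====
-- def consolidate_corrections(corrections):
--     """
--     Resolve multiple candidates for the same source string via majority vote.
--     Ties are broken by last occurrence; longer source strings are applied first.
--     Single pass per pair: maintain per-source stats target -> (count, last_index)
--     and pick the winner with one max over the stats, instead of building target
--     lists, a Counter, a candidate list and a reversed scan per group.
--     """
--     by_from = {}
--     for i, (frm, to) in enumerate(corrections):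
--         if frm and to and frm != to:
--             stats = by_from.setdefault(frm, {})
--             cnt, _ = stats.get(to, (0, 0))
--             stats[to] = (cnt + 1, i)
--     final = [(frm, max(stats.items(), key=lambda kv: kv[1])[0])
--              for frm, stats in by_from.items()]
--     final.sort(key=lambda p: len(p[0]), reverse=True)
--     return final
-- ===== Notes on version B (the rewrite author's own statement) =====
-- stated objective: alternative
-- what changed: Per source string B keeps a single dict target -> (count, last_index) built in one pass and picks the winner with one max over its items, replacing A's per-group target list, Counter, candidate list and reversed rescan; grouping order and the final stable length sort are unchanged.
import Mathlib
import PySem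

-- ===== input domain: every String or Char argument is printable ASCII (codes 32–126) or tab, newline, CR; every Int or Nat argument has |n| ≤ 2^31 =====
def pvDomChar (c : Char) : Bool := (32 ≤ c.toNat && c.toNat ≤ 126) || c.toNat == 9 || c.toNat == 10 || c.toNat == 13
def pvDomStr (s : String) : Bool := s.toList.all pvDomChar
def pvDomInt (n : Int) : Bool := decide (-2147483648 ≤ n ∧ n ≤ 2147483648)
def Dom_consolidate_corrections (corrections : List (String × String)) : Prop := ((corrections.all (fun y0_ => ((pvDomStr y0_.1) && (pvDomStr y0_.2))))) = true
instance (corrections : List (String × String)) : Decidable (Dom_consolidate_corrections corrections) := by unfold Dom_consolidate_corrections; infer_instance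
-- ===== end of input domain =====

-- B replaces A's per-group target list + Counter + candidate list + reversed rescan by a single
-- per-source dict target -> (count, last_index) and one max over its items (objective: alternative).

-- ===== PORT A =====
def consolidate_corrections (corrections : List (String × String)) : List (String × String) :=
  let by_from : PySem.Dict String (List String) :=
    corrections.foldl (fun d p =>
      if p.1 ≠ "" ∧ p.2 ≠ "" ∧ p.1 ≠ p.2 then d.modify p.1 [] (fun l => l ++ [p.2]) else d)
      PySem.Dict.empty
  let final : List (String × String) :=
    by_from.items.foldl (fun acc fp =>
      let counts := PySem.Dict.counter fp.2
      match PySem.List.max? counts.values (fun v => v) with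
      | none => acc  -- unreachable: every stored group list is nonempty
      | some max_freq =>
        let candidates := (counts.items.filter (fun tc => tc.2 == max_freq)).map (fun tc => tc.1)
        match fp.2.reverse.find? (fun t => candidates.contains t) with
        | some t => acc ++ [(fp.1, t)]
        | none => acc) []
  PySem.List.sorted final (fun p => PySem.Str.len p.1) true

-- ===== PORT B =====
def consolidate_corrections_alt (corrections : List (String × String)) : List (String × String) :=
  let by_from : PySem.Dict String (PySem.Dict String (Int × Int)) :=
    (PySem.List.enumerate corrections 0).foldl (fun d ip =>
      if ip.2.1 ≠ "" ∧ ip.2.2 ≠ "" ∧ ip.2.1 ≠ ip.2.2 then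
        d.modify ip.2.1 PySem.Dict.empty
          (fun stats => stats.insert ip.2.2 ((stats.getD ip.2.2 (0, 0)).1 + 1, ip.1))
      else d)
      PySem.Dict.empty
  let final : List (String × String) :=
    by_from.items.map (fun fs =>
      match PySem.List.max2? fs.2.items (fun kv => kv.2.1) (fun kv => kv.2.2) with
      | some kv => (fs.1, kv.1)
      | none => (fs.1, ""))  -- unreachable: every stored stats dict is nonempty
  PySem.List.sorted final (fun p => PySem.Str.len p.1) true

-- ===== PRECONDITION & SPEC =====
def Spec_consolidate_corrections (corrections : List (String × String)) (out : List (String × String)) : Prop := out = consolidate_corrections_alt corrections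
instance (corrections : List (String × String)) (out : List (String × String)) : Decidable (Spec_consolidate_corrections corrections out) := by unfold Spec_consolidate_corrections; infer_instance

-- ===== CLAIM (what is proved, stated in full; the proofs are below) =====
def Claim_equal_consolidate_corrections : Prop := ∀ (corrections : List (String × String)), Dom_consolidate_corrections corrections → Spec_consolidate_corrections corrections (consolidate_corrections corrections)

-- ===== LEMMAS AND PROOFS =====

-- the cleaned pair list both ports group
def pvCleaned (cs : List (String × String)) : List (String × String) :=
  cs.filter (fun p => decide (p.1 ≠ "" ∧ p.2 ≠ "" ∧ p.1 ≠ p.2))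

-- A's group content for a source string
def pvTos (cs : List (String × String)) (frm : String) : List String :=
  ((pvCleaned cs).filter (fun p => p.1 == frm)).map (fun p => p.2)

-- B's group content: (original index, target) pairs for a source string
def pvPs (cs : List (String × String)) (frm : String) : List (Int × String) :=
  ((((PySem.List.enumerate cs 0).filter
        (fun ip => decide (ip.2.1 ≠ "" ∧ ip.2.2 ≠ "" ∧ ip.2.1 ≠ ip.2.2))).filter
      (fun ip => ip.2.1 == frm)).map (fun ip => (ip.1, ip.2.2)))

-- index stored by B for target t after processing q (last occurrence wins), default d
def pvLastIdxD (q : List (Int × String)) (t : String) (d : Int) : Int :=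
  match q.reverse.find? (fun p => p.2 == t) with
  | some p => p.1
  | none => d

-- the winner both ports agree on (B's formulation)
def pvWinner (cs : List (String × String)) (frm : String) : String :=
  match PySem.List.max2?
      ((PySem.Set.ofList (pvTos cs frm)).map
        (fun t => (t, (((pvTos cs frm).count t : Int), pvLastIdxD (pvPs cs frm) t 0))))
      (fun kv => kv.2.1) (fun kv => kv.2.2) with
  | some kv => kv.1
  | none => ""

-- pointwise-equal predicates give equal find?
theorem pvFind?_congr {a : Type} (l : List a) (p q : a → Bool) (h : ∀ x, p x = q x) :
    l.find? p = l.find? q := by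
  induction l with
  | nil => rfl
  | cons x t ih => simp only [List.find?_cons, h x, ih]

-- getD through a keyed modify-fold: only the pairs whose key matches contribute, in order
theorem pvGetD_foldl_modify_key {k v a : Type} [BEq k] [LawfulBEq k]
    (l : List a) (key : a → k) (d0 : v) (f : a → v → v) (d : PySem.Dict k v) (c : k) :
    (l.foldl (fun d x => d.modify (key x) d0 (f x)) d).getD c d0
      = (l.filter (fun x => key x == c)).foldl (fun acc x => f x acc) (d.getD c d0) := by
  induction l generalizing d with
  | nil => rfl
  | cons x t ih =>
    simp only [List.foldl_cons, List.filter_cons]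
    by_cases hx : key x = c
    · subst hx
      simp only [BEq.rfl, if_pos, ih, PySem.Dict.getD_modify_self, List.foldl_cons]
    · rw [ih]
      have hbe : (key x == c) = false := by simp [hx]
      simp only [hbe, Bool.false_eq_true, if_false,
        PySem.Dict.getD_modify_of_ne d d0 (f x) (Ne.symm hx)]

-- getD through B's per-group stats fold: count of t plus last stored index
theorem pvGetD_statsFold (q : List (Int × String)) (s : PySem.Dict String (Int × Int)) (t : String) :
    (q.foldl (fun s p => s.insert p.2 ((s.getD p.2 (0, 0)).1 + 1, p.1)) s).getD t (0, 0)
      = ((s.getD t (0, 0)).1 + ((q.map (fun p => p.2)).count t : Int),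
          pvLastIdxD q t (s.getD t (0, 0)).2) := by
  induction q using List.reverseRecOn with
  | nil => simp [pvLastIdxD]
  | append_singleton q p ih =>
    simp only [List.foldl_append, List.foldl_cons, List.foldl_nil]
    by_cases hp : t = p.2
    · subst hp
      rw [PySem.Dict.getD_insert_self, ih]
      simp [pvLastIdxD, List.count_append]
      ring
    · rw [PySem.Dict.getD_insert_of_ne _ _ _ hp, ih]
      have hne : p.2 ≠ t := fun h => hp h.symm
      have hbe : (p.2 == t) = false := by simp [hne]
      simp [pvLastIdxD, hbe, List.count_append, hne]

-- the fold step of PySem.List.max2? at Int keys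
def pvStep {a : Type} (k1 k2 : a → Int) : Option a → a → Option a := fun acc x =>
  match acc with
  | none => some x
  | some m =>
    if (decide (k1 m < k1 x) || !decide (k1 x < k1 m) && decide (k2 m < k2 x)) = true
    then some x else some m

theorem pvMax2?_eq_foldl {a : Type} (xs : List a) (k1 k2 : a → Int) :
    PySem.List.max2? xs k1 k2 = xs.foldl (pvStep k1 k2) none := rfl

-- Python's max with a tuple key returns the unique strictly lex-greatest item
theorem pvMax2?_go {a : Type} (k1 k2 : a → Int) (w : a) :
    ∀ (xs : List a) (acc : Option a),
      (∀ y ∈ xs, y = w ∨ k1 y < k1 w ∨ (k1 y = k1 w ∧ k2 y < k2 w)) →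
      (w ∈ xs ∨ acc = some w) →
      (acc = none ∨ acc = some w ∨
        ∃ z, acc = some z ∧ (k1 z < k1 w ∨ (k1 z = k1 w ∧ k2 z < k2 w))) →
      xs.foldl (pvStep k1 k2) acc = some w := by
  intro xs
  induction xs with
  | nil =>
    intro acc _ hmem _
    rcases hmem with h | h
    · exact absurd h List.not_mem_nil
    · simpa using h
  | cons x t ih =>
    intro acc hdom hmem hacc
    have hdt : ∀ y ∈ t, y = w ∨ k1 y < k1 w ∨ (k1 y = k1 w ∧ k2 y < k2 w) :=
      fun y hy => hdom y (List.mem_cons_of_mem _ hy)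
    simp only [List.foldl_cons]
    rcases hdom x List.mem_cons_self with hxw | hxd
    · subst hxw
      have hstep : pvStep k1 k2 acc x = some x := by
        rcases hacc with rfl | rfl | ⟨z, rfl, hz⟩
        · rfl
        · simp only [pvStep]; split <;> rfl
        · simp only [pvStep]
          rw [if_pos]
          simp only [Bool.or_eq_true, Bool.and_eq_true, Bool.not_eq_true',
            decide_eq_true_eq, decide_eq_false_iff_not]
          omega
      rw [hstep]
      exact ih _ hdt (Or.inr rfl) (Or.inr (Or.inl rfl))
    · have hxne : x ≠ w := by
        intro h; subst h; rcases hxd with h | ⟨h1, h2⟩ <;> omega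
      rcases hacc with rfl | rfl | ⟨z, rfl, hz⟩
      · have hw : w ∈ t := by
          rcases hmem with h | h
          · rcases List.mem_cons.mp h with h' | h'
            · exact absurd h'.symm hxne
            · exact h'
          · exact absurd h (by simp)
        exact ih _ hdt (Or.inl hw) (Or.inr (Or.inr ⟨x, rfl, hxd⟩))
      · have hstep : pvStep k1 k2 (some w) x = some w := by
          simp only [pvStep]
          rw [if_neg]
          simp only [Bool.or_eq_true, Bool.and_eq_true, Bool.not_eq_true',
            decide_eq_true_eq, decide_eq_false_iff_not]
          rcases hxd with h | ⟨h1, h2⟩ <;> omega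
        rw [hstep]
        exact ih _ hdt (Or.inr rfl) (Or.inr (Or.inl rfl))
      · have hw : w ∈ t := by
          rcases hmem with h | h
          · rcases List.mem_cons.mp h with h' | h'
            · exact absurd h'.symm hxne
            · exact h'
          · have hzw : z = w := by simpa using h
            subst hzw
            rcases hz with h' | ⟨h1, h2⟩ <;> omega
        have hstep : pvStep k1 k2 (some z) x = some x ∨ pvStep k1 k2 (some z) x = some z := by
          simp only [pvStep]; split
          · exact Or.inl rfl
          · exact Or.inr rfl
        rcases hstep with h | h <;> rw [h]
        · exact ih _ hdt (Or.inl hw) (Or.inr (Or.inr ⟨x, rfl, hxd⟩))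
        · exact ih _ hdt (Or.inl hw) (Or.inr (Or.inr ⟨z, rfl, hz⟩))

theorem pvMax2?_unique {a : Type} (xs : List a) (k1 k2 : a → Int) (w : a) (hw : w ∈ xs)
    (hdom : ∀ y ∈ xs, y = w ∨ k1 y < k1 w ∨ (k1 y = k1 w ∧ k2 y < k2 w)) :
    PySem.List.max2? xs k1 k2 = some w := by
  rw [pvMax2?_eq_foldl]
  exact pvMax2?_go k1 k2 w xs none hdom (Or.inl hw) (Or.inl rfl)

-- per-group: A's reversed scan for a most-frequent target and B's max over
-- (count, last index) stats pick the same winner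
theorem pvGroup_winner (ps : List (Int × String))
    (hmono : (ps.map (fun p => p.1)).Pairwise (· < ·)) (M : Int)
    (hM : PySem.List.max? ((PySem.Set.ofList (ps.map (fun p => p.2))).map
        (fun k => (((ps.map (fun p => p.2)).count k : Int)))) (fun v => v) = some M) :
    ∃ a : String,
      (ps.map (fun p => p.2)).reverse.find?
          (fun t => decide (t ∈ ps.map (fun p => p.2) ∧ (((ps.map (fun p => p.2)).count t : Int) = M)))
        = some a ∧
      PySem.List.max2?
          ((PySem.Set.ofList (ps.map (fun p => p.2))).map
            (fun t => (t, ((((ps.map (fun p => p.2)).count t : Int)), pvLastIdxD ps t 0))))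
          (fun kv => kv.2.1) (fun kv => kv.2.2)
        = some (a, ((((ps.map (fun p => p.2)).count a : Int)), pvLastIdxD ps a 0)) := by
  have hMmem := PySem.List.max?_mem hM
  have hMmax := PySem.List.max?_isMax hM
  obtain ⟨t0, ht0S, ht0c⟩ := List.mem_map.mp hMmem
  have ht0 : t0 ∈ ps.map (fun p => p.2) := (PySem.Set.mem_ofList _ _).mp ht0S
  have hsome : ((ps.map (fun p => p.2)).reverse.find?
      (fun t => decide (t ∈ ps.map (fun p => p.2) ∧ (((ps.map (fun p => p.2)).count t : Int) = M)))).isSome := by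
    apply List.find?_isSome.mpr
    exact ⟨t0, List.mem_reverse.mpr ht0, by simp [ht0, ht0c]⟩
  obtain ⟨a, ha⟩ := Option.isSome_iff_exists.mp hsome
  refine ⟨a, ha, ?_⟩
  obtain ⟨hpa, l1, l2, hsplit, hfail⟩ := List.find?_eq_some_iff_append.mp ha
  simp only [decide_eq_true_eq] at hpa
  obtain ⟨hamem, hacnt⟩ := hpa
  rw [← List.map_reverse] at hsplit
  obtain ⟨q1, r, hps, hq1, hr⟩ := List.map_eq_append_iff.mp hsplit
  obtain ⟨pa, q2, hr2, hpa2, hq2⟩ := List.map_eq_cons_iff.mp hr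
  subst hr2
  have hq1fail : ∀ x ∈ q1, ((ps.map (fun p => p.2)).count x.2 : Int) ≠ M := by
    intro x hx hcx
    have hxl1 : x.2 ∈ l1 := hq1 ▸ List.mem_map.mpr ⟨x, hx, rfl⟩
    have hxf := hfail _ hxl1
    simp only [Bool.not_eq_eq_eq_not, Bool.not_true, decide_eq_false_iff_not] at hxf
    apply hxf
    refine ⟨?_, hcx⟩
    have hxps : x ∈ ps := by
      rw [← List.mem_reverse, hps]
      exact List.mem_append_left _ hx
    exact List.mem_map.mpr ⟨x, hxps, rfl⟩
  have hlasta : pvLastIdxD ps a 0 = pa.1 := by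
    unfold pvLastIdxD
    rw [hps, List.find?_append]
    have h1 : q1.find? (fun p => p.2 == a) = none := by
      apply List.find?_eq_none.mpr
      intro x hx
      simp only [beq_iff_eq]
      intro hxa
      exact hq1fail x hx (hxa ▸ hacnt)
    rw [h1]
    simp [hpa2]
  have hq2lt : ∀ b ∈ q2, b.1 < pa.1 := by
    have h1 : ps.Pairwise (fun x y => x.1 < y.1) := List.pairwise_map.mp hmono
    have h2 : ps.reverse.Pairwise (fun x y => y.1 < x.1) := List.pairwise_reverse.mpr h1
    rw [hps] at h2
    have h3 := (List.pairwise_append.mp h2).2.1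
    exact fun b hb => (List.pairwise_cons.mp h3).1 b hb
  have hother : ∀ t, t ∈ ps.map (fun p => p.2) → t ≠ a →
      ((ps.map (fun p => p.2)).count t : Int) = M → pvLastIdxD ps t 0 < pa.1 := by
    intro t htmem htne htc
    unfold pvLastIdxD
    rw [hps, List.find?_append]
    have h1 : q1.find? (fun p => p.2 == t) = none := by
      apply List.find?_eq_none.mpr
      intro x hx
      simp only [beq_iff_eq]
      intro hxt
      exact hq1fail x hx (hxt ▸ htc)
    rw [h1]
    have hpane : (pa.2 == t) = false := by simp [hpa2, Ne.symm htne]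
    simp only [Option.none_or, List.find?_cons, hpane]
    obtain ⟨p0, hp0ps, hp02⟩ := List.mem_map.mp htmem
    have hp0rev : p0 ∈ q1 ++ pa :: q2 := by
      rw [← hps]; exact List.mem_reverse.mpr hp0ps
    have hp0q2 : p0 ∈ q2 := by
      rcases List.mem_append.mp hp0rev with h | h
      · exact absurd (hp02 ▸ htc) (hq1fail p0 h)
      · rcases List.mem_cons.mp h with h | h
        · exact absurd (h ▸ hp02 : pa.2 = t) (by rw [hpa2]; exact fun he => htne he.symm)
        · exact h
    have hq2some : (q2.find? (fun p => p.2 == t)).isSome :=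
      List.find?_isSome.mpr ⟨p0, hp0q2, by simp [hp02]⟩
    obtain ⟨pt, hpt⟩ := Option.isSome_iff_exists.mp hq2some
    rw [hpt]
    exact hq2lt pt (List.mem_of_find?_eq_some hpt)
  apply pvMax2?_unique
  · exact List.mem_map.mpr ⟨a, (PySem.Set.mem_ofList _ _).mpr hamem, rfl⟩
  · intro y hy
    obtain ⟨t, htS, rfl⟩ := List.mem_map.mp hy
    by_cases hta : t = a
    · subst hta; exact Or.inl rfl
    · have htmem : t ∈ ps.map (fun p => p.2) := (PySem.Set.mem_ofList _ _).mp htS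
      have hcle : ((ps.map (fun p => p.2)).count t : Int) ≤ M :=
        hMmax _ (List.mem_map.mpr ⟨t, htS, rfl⟩)
      rcases lt_or_eq_of_le hcle with hlt | heq
      · exact Or.inr (Or.inl (by simpa [hacnt] using hlt))
      · refine Or.inr (Or.inr ⟨by simpa [hacnt] using heq, ?_⟩)
        simpa [hlasta] using hother t htmem hta heq

-- keys of both groupings (insertion order of the first kept occurrence)
def pvKeys (cs : List (String × String)) : List String :=
  PySem.Set.ofList ((pvCleaned cs).map (fun p => p.1))

-- a filter-on-the-pair then project-the-pair loop over enumerate forgets the indices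
theorem pvEnum_filter_map {g' : Type} (cs : List (String × String))
    (q : (String × String) → Bool) (g : (String × String) → g') :
    ∀ s : Int, (((PySem.List.enumerate cs s).filter (fun ip => q ip.2)).map (fun ip => g ip.2))
      = (cs.filter q).map g := by
  induction cs with
  | nil => intro s; rfl
  | cons x t ih =>
    intro s
    rw [PySem.List.enumerate_cons, List.filter_cons, List.filter_cons]
    by_cases hx : q x
    · simp only [hx, if_pos, List.map_cons, ih]
    · simp only [hx, Bool.false_eq_true, if_false, ih]

theorem pvPs_map_snd (cs : List (String × String)) (frm : String) :
    (pvPs cs frm).map (fun p => p.2) = pvTos cs frm := by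
  unfold pvPs pvTos pvCleaned
  rw [List.map_map, List.filter_filter, List.filter_filter]
  have h := pvEnum_filter_map cs
    (fun p => (p.1 == frm) && decide (p.1 ≠ "" ∧ p.2 ≠ "" ∧ p.1 ≠ p.2)) (fun p => p.2) 0
  simpa using h

theorem pvKeys_eq (cs : List (String × String)) :
    ((PySem.List.enumerate cs 0).filter
        (fun ip => decide (ip.2.1 ≠ "" ∧ ip.2.2 ≠ "" ∧ ip.2.1 ≠ ip.2.2))).map (fun ip => ip.2.1)
      = (pvCleaned cs).map (fun p => p.1) := by
  exact pvEnum_filter_map cs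
    (fun p => decide (p.1 ≠ "" ∧ p.2 ≠ "" ∧ p.1 ≠ p.2)) (fun p => p.1) 0

theorem pvPs_mono (cs : List (String × String)) (frm : String) :
    ((pvPs cs frm).map (fun p => p.1)).Pairwise (· < ·) := by
  unfold pvPs
  rw [List.map_map]
  have h1 : (PySem.List.enumerate cs 0).Pairwise (fun p q => p.1 < q.1) :=
    PySem.List.pairwise_lt_enumerate cs 0
  have hsub : ((PySem.List.enumerate cs 0).filter
      (fun ip => decide (ip.2.1 ≠ "" ∧ ip.2.2 ≠ "" ∧ ip.2.1 ≠ ip.2.2))).filter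
      (fun ip => ip.2.1 == frm) |>.Sublist (PySem.List.enumerate cs 0) :=
    List.filter_sublist.trans List.filter_sublist
  exact List.pairwise_map.mpr (List.Pairwise.sublist hsub h1)

theorem pvTos_ne_nil (cs : List (String × String)) (frm : String) (h : frm ∈ pvKeys cs) :
    pvTos cs frm ≠ [] := by
  unfold pvKeys at h
  obtain ⟨p, hp, hp1⟩ := List.mem_map.mp ((PySem.Set.mem_ofList _ _).mp h)
  unfold pvTos
  intro hnil
  have hpf : p ∈ (pvCleaned cs).filter (fun p => p.1 == frm) :=
    List.mem_filter.mpr ⟨hp, by simp [hp1]⟩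
  rw [List.eq_nil_iff_forall_not_mem] at hnil
  exact hnil p.2 (List.mem_map.mpr ⟨p, hpf, rfl⟩)

-- everything the two per-group computations agree on, for a key that occurs
theorem pvWinner_spec (cs : List (String × String)) (frm : String) (h : frm ∈ pvKeys cs) :
    ∃ M a,
      PySem.List.max? ((PySem.Set.ofList (pvTos cs frm)).map
          (fun k => ((pvTos cs frm).count k : Int))) (fun v => v) = some M ∧
      (pvTos cs frm).reverse.find?
          (fun t => decide (t ∈ pvTos cs frm ∧ (((pvTos cs frm).count t : Int) = M))) = some a ∧
      PySem.List.max2?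
          ((PySem.Set.ofList (pvTos cs frm)).map
            (fun t => (t, (((pvTos cs frm).count t : Int), pvLastIdxD (pvPs cs frm) t 0))))
          (fun kv => kv.2.1) (fun kv => kv.2.2)
        = some (a, (((pvTos cs frm).count a : Int), pvLastIdxD (pvPs cs frm) a 0)) ∧
      pvWinner cs frm = a := by
  have hne := pvTos_ne_nil cs frm h
  -- the value list is nonempty, so Python's max returns some M
  have hvne : (PySem.Set.ofList (pvTos cs frm)).map
      (fun k => ((pvTos cs frm).count k : Int)) ≠ [] := by
    simp only [ne_eq, List.map_eq_nil_iff]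
    intro hS
    rcases List.exists_mem_of_ne_nil _ hne with ⟨x, hx⟩
    have := (PySem.Set.mem_ofList (pvTos cs frm) x).mpr hx
    rw [hS] at this
    exact List.not_mem_nil this
  obtain ⟨M, hM⟩ : ∃ M, PySem.List.max? ((PySem.Set.ofList (pvTos cs frm)).map
      (fun k => ((pvTos cs frm).count k : Int))) (fun v => v) = some M := by
    cases hm : PySem.List.max? ((PySem.Set.ofList (pvTos cs frm)).map
        (fun k => ((pvTos cs frm).count k : Int))) (fun v => v) with
    | none => exact absurd ((PySem.List.max?_eq_none_iff _ _).mp hm) hvne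
    | some m => exact ⟨m, rfl⟩
  rw [← pvPs_map_snd cs frm] at hM ⊢
  obtain ⟨a, hfA, hfB⟩ := pvGroup_winner (pvPs cs frm) (pvPs_mono cs frm) M hM
  refine ⟨M, a, hM, hfA, hfB, ?_⟩
  unfold pvWinner
  rw [← pvPs_map_snd cs frm, hfB]
theorem pvGetD_A (cs : List (String × String)) (frm : String) :
    ((pvCleaned cs).foldl (fun d p => d.modify p.1 [] (fun l => l ++ [p.2]))
        (PySem.Dict.empty : PySem.Dict String (List String))).getD frm []
      = pvTos cs frm := by
  rw [pvGetD_foldl_modify_key (pvCleaned cs) (fun p => p.1) [] (fun p l => l ++ [p.2])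
      PySem.Dict.empty frm]
  rw [PySem.Dict.getD_empty]
  rw [PySem.List.foldl_append_singleton_eq_map (fun p : String × String => p.2)
      (List.filter (fun x => x.1 == frm) (pvCleaned cs)) []]
  simp [pvTos]

theorem pvGetD_B (cs : List (String × String)) (frm : String) :
    (((PySem.List.enumerate cs 0).filter
          (fun ip => decide (ip.2.1 ≠ "" ∧ ip.2.2 ≠ "" ∧ ip.2.1 ≠ ip.2.2))).foldl
        (fun d ip => d.modify ip.2.1 PySem.Dict.empty
          (fun stats => stats.insert ip.2.2 ((stats.getD ip.2.2 (0, 0)).1 + 1, ip.1)))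
        (PySem.Dict.empty : PySem.Dict String (PySem.Dict String (Int × Int)))).getD frm
        PySem.Dict.empty
      = (pvPs cs frm).foldl
          (fun s p => s.insert p.2 ((s.getD p.2 (0, 0)).1 + 1, p.1)) PySem.Dict.empty := by
  rw [pvGetD_foldl_modify_key
      ((PySem.List.enumerate cs 0).filter
        (fun ip => decide (ip.2.1 ≠ "" ∧ ip.2.2 ≠ "" ∧ ip.2.1 ≠ ip.2.2)))
      (fun ip => ip.2.1) PySem.Dict.empty
      (fun ip stats => stats.insert ip.2.2 ((stats.getD ip.2.2 (0, 0)).1 + 1, ip.1))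
      PySem.Dict.empty frm]
  rw [PySem.Dict.getD_empty]
  unfold pvPs
  rw [List.foldl_map]

theorem pvBodyA (cs : List (String × String)) (frm : String) (h : frm ∈ pvKeys cs)
    (acc : List (String × String)) :
    (let counts := PySem.Dict.counter (pvTos cs frm)
     match PySem.List.max? counts.values (fun v => v) with
     | none => acc
     | some max_freq =>
       let candidates := (counts.items.filter (fun tc => tc.2 == max_freq)).map (fun tc => tc.1)
       match (pvTos cs frm).reverse.find? (fun t => candidates.contains t) with
       | some t => acc ++ [(frm, t)]
       | none => acc)
    = acc ++ [(frm, pvWinner cs frm)] := by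
  obtain ⟨M, a, hM, hfA, hfB, hwin⟩ := pvWinner_spec cs frm h
  have hvals : (PySem.Dict.counter (pvTos cs frm)).values
      = (PySem.Set.ofList (pvTos cs frm)).map (fun k => (((pvTos cs frm).count k : Int))) := by
    show ((PySem.Dict.counter (pvTos cs frm)).items.map (fun p => p.2)) = _
    rw [PySem.Dict.items_counter, List.map_map]
    rfl
  simp only [hvals, hM]
  have hcand : ∀ t : String,
      (((PySem.Dict.counter (pvTos cs frm)).items.filter
          (fun tc => tc.2 == M)).map (fun tc => tc.1)).contains t
        = decide (t ∈ pvTos cs frm ∧ (((pvTos cs frm).count t : Int) = M)) := by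
    intro t
    rw [Bool.eq_iff_iff]
    simp [PySem.Dict.items_counter, List.filter_map, List.mem_filter, PySem.Set.mem_ofList]
  rw [pvFind?_congr _ _ _ hcand, hfA, hwin]

theorem pvBodyB (cs : List (String × String)) (frm : String) (h : frm ∈ pvKeys cs) :
    (match PySem.List.max2?
        (((pvPs cs frm).foldl
            (fun s p => s.insert p.2 ((s.getD p.2 (0, 0)).1 + 1, p.1))
            (PySem.Dict.empty : PySem.Dict String (Int × Int))).items)
        (fun kv => kv.2.1) (fun kv => kv.2.2) with
     | some kv => (frm, kv.1)
     | none => (frm, ""))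
    = (frm, pvWinner cs frm) := by
  obtain ⟨M, a, hM, hfA, hfB, hwin⟩ := pvWinner_spec cs frm h
  have hnd : ((pvPs cs frm).foldl
      (fun s p => s.insert p.2 ((s.getD p.2 (0, 0)).1 + 1, p.1))
      (PySem.Dict.empty : PySem.Dict String (Int × Int))).keys.Nodup :=
    PySem.Dict.nodup_keys_foldl_insert_key (pvPs cs frm) (fun p => p.2)
      (fun s p => ((s.getD p.2 (0, 0)).1 + 1, p.1)) PySem.Dict.empty
      PySem.Dict.nodup_keys_empty
  have hkeys : ((pvPs cs frm).foldl
      (fun s p => s.insert p.2 ((s.getD p.2 (0, 0)).1 + 1, p.1))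
      (PySem.Dict.empty : PySem.Dict String (Int × Int))).keys
      = PySem.Set.ofList (pvTos cs frm) := by
    rw [PySem.Dict.keys_foldl_insert_key (pvPs cs frm) (fun p => p.2)
      (fun s p => ((s.getD p.2 (0, 0)).1 + 1, p.1)) PySem.Dict.empty]
    rw [PySem.Dict.keys_empty, PySem.Set.update_nil_left, pvPs_map_snd]
  have hitems : ((pvPs cs frm).foldl
      (fun s p => s.insert p.2 ((s.getD p.2 (0, 0)).1 + 1, p.1))
      (PySem.Dict.empty : PySem.Dict String (Int × Int))).items
      = (PySem.Set.ofList (pvTos cs frm)).map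
          (fun t => (t, (((pvTos cs frm).count t : Int), pvLastIdxD (pvPs cs frm) t 0))) := by
    rw [PySem.Dict.items_eq_map_keys _ hnd (0, 0), hkeys]
    apply List.map_congr_left
    intro t ht
    rw [pvGetD_statsFold, PySem.Dict.getD_empty]
    rw [pvPs_map_snd]
    simp
  rw [hitems, hfB, hwin]

-- the whole A-side result list before sorting
theorem pvA_final (cs : List (String × String)) :
    ((pvCleaned cs).foldl (fun d p => d.modify p.1 [] (fun l => l ++ [p.2]))
        (PySem.Dict.empty : PySem.Dict String (List String))).items.foldl
      (fun acc fp =>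
        match PySem.List.max? (PySem.Dict.counter fp.2).values (fun v => v) with
        | none => acc
        | some max_freq =>
          match fp.2.reverse.find?
              (fun t => (((PySem.Dict.counter fp.2).items.filter
                (fun tc => tc.2 == max_freq)).map (fun tc => tc.1)).contains t) with
          | some t => acc ++ [(fp.1, t)]
          | none => acc) []
    = (pvKeys cs).map (fun k => (k, pvWinner cs k)) := by
  have hndA : ((pvCleaned cs).foldl (fun d p => d.modify p.1 [] (fun l => l ++ [p.2]))
      (PySem.Dict.empty : PySem.Dict String (List String))).keys.Nodup :=
    PySem.Dict.nodup_keys_foldl_modify_key (pvCleaned cs) (fun p => p.1) []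
      (fun _ p => fun l => l ++ [p.2]) PySem.Dict.empty PySem.Dict.nodup_keys_empty
  have hkeysA : ((pvCleaned cs).foldl (fun d p => d.modify p.1 [] (fun l => l ++ [p.2]))
      (PySem.Dict.empty : PySem.Dict String (List String))).keys = pvKeys cs := by
    rw [PySem.Dict.keys_foldl_modify_key (pvCleaned cs) (fun p => p.1) []
      (fun _ p => fun l => l ++ [p.2]) PySem.Dict.empty]
    rw [PySem.Dict.keys_empty, PySem.Set.update_nil_left]
    rfl
  have h : ∀ (acc : List (String × String)),
      ∀ fp ∈ ((pvCleaned cs).foldl (fun d p => d.modify p.1 [] (fun l => l ++ [p.2]))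
        (PySem.Dict.empty : PySem.Dict String (List String))).items,
      (match PySem.List.max? (PySem.Dict.counter fp.2).values (fun v => v) with
        | none => acc
        | some max_freq =>
          match fp.2.reverse.find?
              (fun t => (((PySem.Dict.counter fp.2).items.filter
                (fun tc => tc.2 == max_freq)).map (fun tc => tc.1)).contains t) with
          | some t => acc ++ [(fp.1, t)]
          | none => acc)
        = acc ++ [(fp.1, pvWinner cs fp.1)] := by
    intro acc fp hfp
    have hk : fp.1 ∈ pvKeys cs := by
      rw [← hkeysA]
      exact PySem.Dict.mem_keys_of_mem_items _ hfp
    have hv : fp.2 = pvTos cs fp.1 := by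
      have h1 := PySem.Dict.getD_of_mem_items _
        (show (fp.1, fp.2) ∈ _ from by simpa using hfp) hndA []
      rw [← h1, pvGetD_A]
    rw [hv]
    exact pvBodyA cs fp.1 hk acc
  rw [PySem.List.foldl_congr_mem _ _ (fun acc fp => acc ++ [(fp.1, pvWinner cs fp.1)]) _ h]
  rw [PySem.List.foldl_append_singleton_eq_map (fun fp : String × List String => (fp.1, pvWinner cs fp.1))]
  rw [PySem.Dict.items_eq_map_keys _ hndA [], hkeysA, List.map_map, List.nil_append]
  rfl

-- the whole B-side result list before sorting
theorem pvB_final (cs : List (String × String)) :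
    (((PySem.List.enumerate cs 0).filter
          (fun ip => decide (ip.2.1 ≠ "" ∧ ip.2.2 ≠ "" ∧ ip.2.1 ≠ ip.2.2))).foldl
        (fun d ip => d.modify ip.2.1 PySem.Dict.empty
          (fun stats => stats.insert ip.2.2 ((stats.getD ip.2.2 (0, 0)).1 + 1, ip.1)))
        (PySem.Dict.empty : PySem.Dict String (PySem.Dict String (Int × Int)))).items.map
      (fun fs =>
        match PySem.List.max2? fs.2.items (fun kv => kv.2.1) (fun kv => kv.2.2) with
        | some kv => (fs.1, kv.1)
        | none => (fs.1, ""))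
    = (pvKeys cs).map (fun k => (k, pvWinner cs k)) := by
  have hndB : (((PySem.List.enumerate cs 0).filter
      (fun ip => decide (ip.2.1 ≠ "" ∧ ip.2.2 ≠ "" ∧ ip.2.1 ≠ ip.2.2))).foldl
      (fun d ip => d.modify ip.2.1 PySem.Dict.empty
        (fun stats => stats.insert ip.2.2 ((stats.getD ip.2.2 (0, 0)).1 + 1, ip.1)))
      (PySem.Dict.empty : PySem.Dict String (PySem.Dict String (Int × Int)))).keys.Nodup :=
    PySem.Dict.nodup_keys_foldl_modify_key
      ((PySem.List.enumerate cs 0).filter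
        (fun ip => decide (ip.2.1 ≠ "" ∧ ip.2.2 ≠ "" ∧ ip.2.1 ≠ ip.2.2)))
      (fun ip => ip.2.1) PySem.Dict.empty
      (fun _ ip => fun stats => stats.insert ip.2.2 ((stats.getD ip.2.2 (0, 0)).1 + 1, ip.1))
      PySem.Dict.empty PySem.Dict.nodup_keys_empty
  have hkeysB : (((PySem.List.enumerate cs 0).filter
      (fun ip => decide (ip.2.1 ≠ "" ∧ ip.2.2 ≠ "" ∧ ip.2.1 ≠ ip.2.2))).foldl
      (fun d ip => d.modify ip.2.1 PySem.Dict.empty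
        (fun stats => stats.insert ip.2.2 ((stats.getD ip.2.2 (0, 0)).1 + 1, ip.1)))
      (PySem.Dict.empty : PySem.Dict String (PySem.Dict String (Int × Int)))).keys
      = pvKeys cs := by
    rw [PySem.Dict.keys_foldl_modify_key
      ((PySem.List.enumerate cs 0).filter
        (fun ip => decide (ip.2.1 ≠ "" ∧ ip.2.2 ≠ "" ∧ ip.2.1 ≠ ip.2.2)))
      (fun ip => ip.2.1) PySem.Dict.empty
      (fun _ ip => fun stats => stats.insert ip.2.2 ((stats.getD ip.2.2 (0, 0)).1 + 1, ip.1))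
      PySem.Dict.empty]
    rw [PySem.Dict.keys_empty, PySem.Set.update_nil_left, pvKeys_eq]
    rfl
  rw [PySem.Dict.items_eq_map_keys _ hndB PySem.Dict.empty, hkeysB, List.map_map]
  apply List.map_congr_left
  intro k hk
  show (match PySem.List.max2? (((((PySem.List.enumerate cs 0).filter
      (fun ip => decide (ip.2.1 ≠ "" ∧ ip.2.2 ≠ "" ∧ ip.2.1 ≠ ip.2.2))).foldl
      (fun d ip => d.modify ip.2.1 PySem.Dict.empty
        (fun stats => stats.insert ip.2.2 ((stats.getD ip.2.2 (0, 0)).1 + 1, ip.1)))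
      (PySem.Dict.empty : PySem.Dict String (PySem.Dict String (Int × Int)))).getD k
        PySem.Dict.empty).items)
      (fun kv => kv.2.1) (fun kv => kv.2.2) with
    | some kv => (k, kv.1)
    | none => (k, "")) = (k, pvWinner cs k)
  rw [pvGetD_B]
  exact pvBodyB cs k hk

-- ===== VERDICT (by name: the statement is the Claim_ definition above) =====
theorem consolidate_corrections_spec : Claim_equal_consolidate_corrections := by
  intro cs _
  unfold Spec_consolidate_corrections consolidate_corrections consolidate_corrections_alt
  simp only [PySem.List.foldl_ite_eq_foldl_filter]
  congr 1
  rw [show (List.filter (fun x : String × String =>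
      decide (x.1 ≠ "" ∧ x.2 ≠ "" ∧ x.1 ≠ x.2)) cs) = pvCleaned cs from rfl]
  rw [pvA_final, pvB_final]
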